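-- pv_equiv track=rewrite | github.com/howardyun/WFDiffusion | data_preprocessing/cell_to_img.py | to_burst_sequence
-- ===== SOURCE A (Python) =====
-- def to_burst_sequence(packet_sequence, target_length):
--     burst_sequence = []
--     current_direction = 0
--     count = 0
--
--     for packet in packet_sequence:
--         if packet == current_direction:
--             count += 1
--         else:
--             if current_direction != 0 and count > 0:
--                 # 对突发包数量进行符号化处理，-1方向用负值表示
--                 burst_sequence.append(count if current_direction == 1 else -count)
--             current_direction = packet
--             count = 1
--
--     # 处理最后一段突发包
--     if current_direction != 0 and count > 0:
--         burst_sequence.append(count if current_direction == 1 else -count)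
--
--     original_length = len(burst_sequence)
--     # 填充或截断突发包序列
--     if len(burst_sequence) < target_length:
--         # 填充0
--         burst_sequence.extend([0] * (target_length - len(burst_sequence)))
--     elif len(burst_sequence) > target_length:
--         # 截断序列
--         burst_sequence = burst_sequence[:target_length]
--
--     return burst_sequence, original_length
-- ===== SOURCE B (Python) =====
-- def _bursts(seq):
--     # recursive run splitting: peel one run off the front, recurse on the rest
--     if not seq:
--         return []
--     head = seq[0]
--     i = 1
--     while i < len(seq) and seq[i] == head:
--         i += 1
--     rest = _bursts(seq[i:])
--     if head == 0:
--         return rest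
--     return [i if head == 1 else -i] + rest
--
-- def to_burst_sequence(packet_sequence, target_length):
--     burst_sequence = _bursts(packet_sequence)
--     original_length = len(burst_sequence)
--     if original_length < target_length:
--         burst_sequence = burst_sequence + [0] * (target_length - original_length)
--     else:
--         burst_sequence = burst_sequence[:target_length]
--     return burst_sequence, original_length
-- ===== Notes on version B (the rewrite author's own statement) =====
-- stated objective: alternative
-- what changed: Replaces A's three-variable state machine (current_direction/count carried across the loop with a trailing flush) by a recursive run-splitting helper that peels one maximal run off the front per call, and merges A's pad/truncate/keep three-way branch into a two-way pad-or-slice.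
import Mathlib
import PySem

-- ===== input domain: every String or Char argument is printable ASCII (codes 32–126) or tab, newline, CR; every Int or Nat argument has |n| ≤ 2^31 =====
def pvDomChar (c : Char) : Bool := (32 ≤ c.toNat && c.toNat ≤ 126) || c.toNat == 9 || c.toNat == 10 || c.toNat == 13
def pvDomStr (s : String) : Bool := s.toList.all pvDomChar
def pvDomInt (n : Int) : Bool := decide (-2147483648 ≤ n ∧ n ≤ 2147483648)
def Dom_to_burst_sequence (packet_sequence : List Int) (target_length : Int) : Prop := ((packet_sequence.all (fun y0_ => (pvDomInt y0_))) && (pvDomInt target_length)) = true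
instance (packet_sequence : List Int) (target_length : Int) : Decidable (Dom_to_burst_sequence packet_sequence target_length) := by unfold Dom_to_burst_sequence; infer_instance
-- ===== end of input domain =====

-- B replaces A's explicit direction/count state machine by recursive run splitting; objective: alternative decomposition (same cost).


-- ===== PORT A =====
-- one step of A's for-loop; state = (burst_sequence, current_direction, count)
def pvStepA (st : List Int × Int × Int) (packet : Int) : List Int × Int × Int :=
  if packet = st.2.1 then (st.1, st.2.1, st.2.2 + 1)
  else if st.2.1 ≠ 0 ∧ st.2.2 > 0 then
    (st.1 ++ [if st.2.1 = 1 then st.2.2 else -st.2.2], packet, 1)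
  else (st.1, packet, 1)

def to_burst_sequence (packet_sequence : List Int) (target_length : Int) : List Int × Int :=
  let st := packet_sequence.foldl pvStepA ([], 0, 0)
  let bs := if st.2.1 ≠ 0 ∧ st.2.2 > 0 then st.1 ++ [if st.2.1 = 1 then st.2.2 else -st.2.2] else st.1
  let original_length : Int := bs.length
  let bs2 := if original_length < target_length then
               bs ++ List.replicate (target_length - original_length).toNat 0
             else if original_length > target_length then
               PySem.List.slice bs none (some target_length)
             else bs
  (bs2, original_length)

-- ===== PORT B =====
-- mirror of the while loop 'i = 1; while i < len(seq) and seq[i] == head: i += 1' (i = 1 + pvRunLen head tail)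
def pvRunLen (h : Int) : List Int → Nat
  | [] => 0
  | x :: t => if x = h then pvRunLen h t + 1 else 0

def pvBursts : List Int → List Int
  | [] => []
  | h :: t =>
    let rest := pvBursts (t.drop (pvRunLen h t))
    if h = 0 then rest
    else (if h = 1 then ((1 + pvRunLen h t : Nat) : Int) else -((1 + pvRunLen h t : Nat) : Int)) :: rest
  termination_by xs => xs.length
  decreasing_by simp


def to_burst_sequence_alt (packet_sequence : List Int) (target_length : Int) : List Int × Int :=
  let bs := pvBursts packet_sequence
  let original_length : Int := bs.length
  let bs2 := if original_length < target_length then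
               bs ++ List.replicate (target_length - original_length).toNat 0
             else PySem.List.slice bs none (some target_length)
  (bs2, original_length)

-- ===== PRECONDITION & SPEC =====
def Spec_to_burst_sequence (packet_sequence : List Int) (target_length : Int) (out : List Int × Int) : Prop := out = to_burst_sequence_alt packet_sequence target_length
instance (packet_sequence : List Int) (target_length : Int) (out : List Int × Int) : Decidable (Spec_to_burst_sequence packet_sequence target_length out) := by unfold Spec_to_burst_sequence; infer_instance

-- ===== CLAIM (what is proved, stated in full; the proofs are below) =====
def Claim_equal_to_burst_sequence : Prop := ∀ (packet_sequence : List Int) (target_length : Int), Dom_to_burst_sequence packet_sequence target_length → Spec_to_burst_sequence packet_sequence target_length (to_burst_sequence packet_sequence target_length)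

-- ===== LEMMAS AND PROOFS =====

-- A's flush of the final burst, applied to a state
def pvFinal (st : List Int × Int × Int) : List Int :=
  if st.2.1 ≠ 0 ∧ st.2.2 > 0 then st.1 ++ [if st.2.1 = 1 then st.2.2 else -st.2.2] else st.1

-- the bursts A will still emit, given current direction cd and count cnt
def pvFrom (cd cnt : Int) : List Int → List Int
  | [] => if cd ≠ 0 ∧ cnt > 0 then [if cd = 1 then cnt else -cnt] else []
  | x :: t => if x = cd then pvFrom cd (cnt + 1) t
              else (if cd ≠ 0 ∧ cnt > 0 then [if cd = 1 then cnt else -cnt] else []) ++ pvFrom x 1 t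

theorem pvFinal_foldl (xs : List Int) : ∀ (bs : List Int) (cd cnt : Int),
    pvFinal (xs.foldl pvStepA (bs, cd, cnt)) = bs ++ pvFrom cd cnt xs := by
  induction xs with
  | nil => intro bs cd cnt; simp [pvFinal, pvFrom]; split_ifs <;> simp
  | cons x t ih =>
    intro bs cd cnt
    simp only [List.foldl_cons, pvFrom, pvStepA]
    by_cases hx : x = cd
    · simp [hx, ih]
    · simp only [hx]
      by_cases hc : cd ≠ 0 ∧ cnt > 0
      · simp [hc, ih]
      · simp [hc, ih]

theorem pvBursts_nil : pvBursts [] = [] := by rw [pvBursts.eq_def]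

theorem pvBursts_cons (h : Int) (t : List Int) :
    pvBursts (h :: t) =
      (if h = 0 then [] else [if h = 1 then ((1 + pvRunLen h t : Nat) : Int) else -((1 + pvRunLen h t : Nat) : Int)])
        ++ pvBursts (t.drop (pvRunLen h t)) := by
  rw [pvBursts.eq_def]
  by_cases h0 : h = 0 <;> simp [h0]

theorem pvFrom_eq (xs : List Int) : ∀ (cd cnt : Int), 0 < cnt →
    pvFrom cd cnt xs =
      (if cd = 0 then [] else [if cd = 1 then cnt + (pvRunLen cd xs : Int) else -(cnt + (pvRunLen cd xs : Int))])
        ++ pvBursts (xs.drop (pvRunLen cd xs)) := by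
  induction xs with
  | nil =>
    intro cd cnt hcnt
    simp [pvFrom, pvRunLen, pvBursts]
    split_ifs with h1 h2 <;> simp_all
  | cons x t ih =>
    intro cd cnt hcnt
    by_cases hx : x = cd
    · have hrun : pvRunLen cd (x :: t) = pvRunLen cd t + 1 := by simp [pvRunLen, hx]
      rw [pvFrom, if_pos hx, ih cd (cnt + 1) (by omega), hrun]
      have : (x :: t).drop (pvRunLen cd t + 1) = t.drop (pvRunLen cd t) := by simp
      rw [this]
      congr 2
      push_cast
      ring_nf
    · have hrun : pvRunLen cd (x :: t) = 0 := by simp [pvRunLen, hx]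
      rw [pvFrom, if_neg hx, ih x 1 (by omega), hrun]
      simp only [List.drop_zero, pvBursts_cons]
      by_cases hcd : cd ≠ 0 ∧ cnt > 0
      · simp only [if_pos hcd, if_neg hcd.1]
        push_cast
        simp
      · have hcd0 : cd = 0 := by
          by_contra h0
          exact hcd ⟨h0, hcnt⟩
        simp only [if_neg hcd, if_pos hcd0]
        push_cast
        simp

theorem pvBursts_eq_final (xs : List Int) :
    pvFinal (xs.foldl pvStepA ([], 0, 0)) = pvBursts xs := by
  cases xs with
  | nil => simp [pvFinal, pvBursts_nil]
  | cons x t =>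
    have hstep : pvStepA ([], 0, 0) x = ([], x, 1) := by
      simp [pvStepA]
      intro hx
      simp [hx]
    rw [List.foldl_cons, hstep, pvFinal_foldl, pvFrom_eq t x 1 (by omega), pvBursts_cons]
    push_cast
    simp

-- ===== VERDICT (by name: the statement is the Claim_ definition above) =====
theorem to_burst_sequence_spec : Claim_equal_to_burst_sequence := by
  intro xs t _
  unfold Spec_to_burst_sequence to_burst_sequence to_burst_sequence_alt
  have hb : (if (xs.foldl pvStepA ([], 0, 0)).2.1 ≠ 0 ∧ (xs.foldl pvStepA ([], 0, 0)).2.2 > 0 then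
      (xs.foldl pvStepA ([], 0, 0)).1 ++ [if (xs.foldl pvStepA ([], 0, 0)).2.1 = 1 then (xs.foldl pvStepA ([], 0, 0)).2.2 else -(xs.foldl pvStepA ([], 0, 0)).2.2]
      else (xs.foldl pvStepA ([], 0, 0)).1) = pvBursts xs := by
    rw [← pvBursts_eq_final]; rfl
  simp only [hb]
  set bs := pvBursts xs with hbs
  by_cases h1 : (bs.length : Int) < t
  · simp [h1]
  · simp only [if_neg h1]
    by_cases h2 : (bs.length : Int) > t
    · simp [h2]
    · have ht : t = (bs.length : Int) := by omega
      simp only [ht]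
      rw [PySem.List.slice_to bs (by positivity)]
      simp
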